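-- pv_equiv track=rewrite | github.com/riboseqorg/RiboSeqOrg-DataPortal | riboseqorg/main/string2query.py | extract_value_field
-- ===== SOURCE A (Python) =====
-- def extract_value_field(input_string: str) -> tuple:
--     """
--     Extracts the value and field from a given input string.
--
--     The function takes a string as input and extracts the value and field.
--     The field is enclosed in square brackets, e.g., "Malawi[country]".
--
--     Args:
--         input_string (str): The input string containing a value and an optional field.
--
--     Returns:
--         tuple: A tuple containing the extracted value and field. If field is not provided, "all" is used.
--                If the value is not present, returns None.
--
--     Examples:
--         >>> extract_value_field("Malawi[country]")
--         ("Malawi", "country")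
--
--         >>> extract_value_field("Malawi")
--         ("Malawi", "all")
--     """
--     value, field = "", ""
--     temp_field = False
--
--     for char in input_string:
--         if char == "[":
--             temp_field = True
--             continue
--         if temp_field:
--             if char == "]":
--                 continue
--             field += char
--         else:
--             value += char
--
--     if not value.strip():
--         return None, None
--
--     if not field.strip():
--         field = "all"
--
--     return value.strip(), field.strip()
-- ===== SOURCE B (Python) =====
-- def extract_value_field(input_string: str) -> tuple:
--     i = input_string.find('[')
--     if i < 0:
--         value, field = input_string, ''
--     else:
--         value = input_string[:i]
--         field = ''.join(ch for ch in input_string[i+1:] if ch not in '[]')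
--     if not value.strip():
--         return None, None
--     if not field.strip():
--         field = 'all'
--     return value.strip(), field.strip()
-- ===== Notes on version B (the rewrite author's own statement) =====
-- stated objective: simpler
-- what changed: Replaces A's character-by-character scan with a temp_field state flag (building value and field by repeated string concatenation) by a direct decomposition: locate the first opening bracket, slice the string into value and tail, and filter bracket characters out of the tail; the shared strip/default tail logic is unchanged.
import Mathlib
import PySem

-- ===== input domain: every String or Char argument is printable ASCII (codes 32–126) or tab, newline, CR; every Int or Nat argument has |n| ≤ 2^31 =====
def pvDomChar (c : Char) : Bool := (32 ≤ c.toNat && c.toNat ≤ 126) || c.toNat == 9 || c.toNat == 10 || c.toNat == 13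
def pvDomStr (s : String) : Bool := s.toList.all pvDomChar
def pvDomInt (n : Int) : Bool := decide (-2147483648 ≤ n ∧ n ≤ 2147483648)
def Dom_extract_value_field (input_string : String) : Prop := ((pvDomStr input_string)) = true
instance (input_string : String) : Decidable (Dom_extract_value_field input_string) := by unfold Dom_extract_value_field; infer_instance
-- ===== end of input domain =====

-- B replaces A's character-by-character state machine by find + slices (simpler decomposition); same values everywhere.

-- ===== PORT A =====
-- literal transliteration of A's for-loop over the characters with state (value, field, temp_field)
def evfStepA (st : List Char × List Char × Bool) (c : Char) : List Char × List Char × Bool :=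
  if c = '[' then (st.1, st.2.1, true)
  else if st.2.2 then
    if c = ']' then st
    else (st.1, st.2.1 ++ [c], st.2.2)
  else (st.1 ++ [c], st.2.1, st.2.2)

def extract_value_field (input_string : String) : Option String × Option String :=
  let st := input_string.toList.foldl evfStepA ([], [], false)
  let value := st.1
  let field := st.2.1
  if (PySem.Chars.strip value).isEmpty then (none, none)
  else if (PySem.Chars.strip field).isEmpty then
    (some (String.ofList (PySem.Chars.strip value)), some "all")
  else
    (some (String.ofList (PySem.Chars.strip value)), some (String.ofList (PySem.Chars.strip field)))

-- ===== PORT B =====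
-- literal transliteration of Source B: find '[', slice, filter out '[' and ']' from the tail
def extract_value_field_alt (input_string : String) : Option String × Option String :=
  let cs := input_string.toList
  let i := PySem.Chars.find cs ['[']
  let vf : List Char × List Char :=
    if i < 0 then (cs, [])
    else (PySem.Chars.slice cs none (some i),
          (PySem.Chars.slice cs (some (i + 1)) none).filter (fun ch => !(ch = '[' ∨ ch = ']')))
  let value := vf.1
  if (PySem.Chars.strip value).isEmpty then (none, none)
  else if (PySem.Chars.strip vf.2).isEmpty then
    (some (String.ofList (PySem.Chars.strip value)), some "all")
  else
    (some (String.ofList (PySem.Chars.strip value)), some (String.ofList (PySem.Chars.strip vf.2)))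

-- ===== PRECONDITION & SPEC =====
def Spec_extract_value_field (input_string : String) (out : Option String × Option String) : Prop := out = extract_value_field_alt input_string
instance (input_string : String) (out : Option String × Option String) : Decidable (Spec_extract_value_field input_string out) := by unfold Spec_extract_value_field; infer_instance

-- ===== CLAIM (what is proved, stated in full; the proofs are below) =====
def Claim_equal_extract_value_field : Prop := ∀ (input_string : String), Dom_extract_value_field input_string → Spec_extract_value_field input_string (extract_value_field input_string)

-- ===== LEMMAS AND PROOFS =====

-- once temp_field is true it stays true; the loop appends every non-bracket char to field
theorem evf_fold_true (b : List Char) (v f : List Char) :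
    b.foldl evfStepA (v, f, true) =
      (v, f ++ b.filter (fun ch => !(ch = '[' ∨ ch = ']')), true) := by
  induction b generalizing f with
  | nil => simp
  | cons c b ih =>
    by_cases h1 : c = '['
    · simp [List.foldl, evfStepA, h1, ih]
    · by_cases h2 : c = ']'
      · simp [List.foldl, evfStepA, h2, ih]
      · simp [List.foldl, evfStepA, h1, h2, ih]

-- before any '[' the loop appends every char to value
theorem evf_fold_false (b : List Char) (v f : List Char) (hb : '[' ∉ b) :
    b.foldl evfStepA (v, f, false) = (v ++ b, f, false) := by
  induction b generalizing v with
  | nil => simp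
  | cons c b ih =>
    have h1 : ¬ c = '[' := fun h => hb (h ▸ List.mem_cons_self ..)
    simp only [List.foldl, evfStepA, if_neg h1, if_neg (Bool.false_ne_true)]
    rw [ih _ (fun h => hb (List.mem_cons_of_mem _ h))]
    simp

theorem singleton_infix_iff {α : Type} (a : α) (l : List α) : [a] <:+: l ↔ a ∈ l := by
  constructor
  · intro h; exact h.mem (List.mem_singleton_self a)
  · intro h
    obtain ⟨s, t, rfl⟩ := List.append_of_mem h
    exact ⟨s, t, by simp⟩

theorem evf_main (cs : List Char) :
    (cs.foldl evfStepA ([], [], false)).1 =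
      (if PySem.Chars.find cs ['['] < 0 then ((cs : List Char), ([] : List Char))
       else (PySem.Chars.slice cs none (some (PySem.Chars.find cs ['['])),
             (PySem.Chars.slice cs (some (PySem.Chars.find cs ['['] + 1)) none).filter
               (fun ch => !(ch = '[' ∨ ch = ']')))).1 ∧
    (cs.foldl evfStepA ([], [], false)).2.1 =
      (if PySem.Chars.find cs ['['] < 0 then ((cs : List Char), ([] : List Char))
       else (PySem.Chars.slice cs none (some (PySem.Chars.find cs ['['])),
             (PySem.Chars.slice cs (some (PySem.Chars.find cs ['['] + 1)) none).filter
               (fun ch => !(ch = '[' ∨ ch = ']')))).2 := by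
  by_cases hin : '[' ∈ cs
  · have hinf : ['['] <:+: cs := (singleton_infix_iff _ _).2 hin
    have hne : PySem.Chars.find cs ['['] ≠ -1 := (PySem.Chars.find_ne_neg_one_iff _ _).2 hinf
    have hge : 0 ≤ PySem.Chars.find cs ['['] := by
      have := PySem.Chars.neg_one_le_find cs ['[']
      omega
    obtain ⟨hpre, hmin⟩ := PySem.Chars.find_spec (s := cs) (sub := ['[']) hge
    set n := (PySem.Chars.find cs ['[']).toNat with hn
    have hlt : n < cs.length := by
      rcases Nat.lt_or_ge n cs.length with h | h
      · omega
      have : cs.drop n = [] := List.drop_eq_nil_of_le h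
      rw [this] at hpre
      simp at hpre
    have hdrop : cs.drop n = '[' :: cs.drop (n + 1) := by
      obtain ⟨t, ht⟩ := hpre
      have hdd : cs.drop (n + 1) = (cs.drop n).drop 1 := by rw [List.drop_drop]
      rw [hdd, ← ht]
      simp
    have hsplit : cs = cs.take n ++ '[' :: cs.drop (n + 1) := by
      conv_lhs => rw [← List.take_append_drop n cs]
      rw [hdrop]
    have hnotin : '[' ∉ cs.take n := by
      intro hmem
      obtain ⟨i, hi, hget⟩ := List.getElem_of_mem hmem
      have hilen : i < n := lt_of_lt_of_le hi (List.length_take_le ..)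
      apply hmin i hilen
      have hgi : cs[i]'(by omega) = '[' := by
        rw [← hget, List.getElem_take]
      refine ⟨(cs.drop i).drop 1, ?_⟩
      rw [List.cons_append, List.nil_append, List.drop_drop]
      have hdi : cs.drop i = cs[i]'(by omega) :: cs.drop (i + 1) := by
        rw [List.drop_eq_getElem_cons (by omega)]
      rw [hdi]
      simp [hgi]
    have hneg : ¬ (PySem.Chars.find cs ['['] < 0) := by omega
    have hfold : cs.foldl evfStepA ([], [], false) =
        (cs.take n, (cs.drop (n + 1)).filter (fun ch => !(ch = '[' ∨ ch = ']')), true) := by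
      conv_lhs => rw [hsplit]
      rw [List.foldl_append, evf_fold_false _ _ _ hnotin, List.foldl_cons]
      have hstep : evfStepA ([] ++ cs.take n, [], false) '[' = ([] ++ cs.take n, [], true) := by
        simp [evfStepA]
      rw [hstep, evf_fold_true]
      simp
    have hint : PySem.Chars.find cs ['['] = (n : Int) := by omega
    have hif : (if PySem.Chars.find cs ['['] < 0 then ((cs : List Char), ([] : List Char))
       else (PySem.Chars.slice cs none (some (PySem.Chars.find cs ['['])),
             (PySem.Chars.slice cs (some (PySem.Chars.find cs ['['] + 1)) none).filter
               (fun ch => !(ch = '[' ∨ ch = ']')))) =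
        (cs.take n, (cs.drop (n + 1)).filter (fun ch => !(ch = '[' ∨ ch = ']'))) := by
      rw [if_neg hneg, hint]
      simp only [PySem.Chars.slice_eq_listSlice]
      rw [PySem.List.slice_to_natCast,
        show ((n : Int) + 1) = ((n + 1 : Nat) : Int) from by push_cast; ring,
        PySem.List.slice_from_natCast]
    rw [hif, hfold]
    exact ⟨rfl, rfl⟩
  · have hninf : ¬ ['['] <:+: cs := fun h => hin ((singleton_infix_iff _ _).1 h)
    have heq : PySem.Chars.find cs ['['] = -1 := (PySem.Chars.find_eq_neg_one_iff _ _).2 hninf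
    rw [evf_fold_false _ _ _ hin]
    simp [heq]

-- ===== VERDICT (by name: the statement is the Claim_ definition above) =====
theorem extract_value_field_spec : Claim_equal_extract_value_field := by
  intro input_string _
  unfold Spec_extract_value_field extract_value_field extract_value_field_alt
  obtain ⟨h1, h2⟩ := evf_main input_string.toList
  simp only
  rw [h1, h2]
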